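-- pv_equiv track=rewrite | github.com/captaindpt/analog-gradients | scripts/plot_memristor_journey.py | phase_segments
-- ===== SOURCE A (Python) =====
-- def phase_segments(rows_sorted, records):
--     segs = []
--     if not rows_sorted:
--         return segs
--     start = rows_sorted[0]
--     prev = rows_sorted[0]
--     phase = records[start]["phase"] or "?"
--     for r in rows_sorted[1:]:
--         p = records[r]["phase"] or "?"
--         if p == phase and r == prev + 1:
--             prev = r
--             continue
--         segs.append((start, prev, phase))
--         start = r
--         prev = r
--         phase = p
--     segs.append((start, prev, phase))
--     return segs
-- ===== SOURCE B (Python) =====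
-- def phase_segments(rows_sorted, records):
--     # Head-run extraction: peel off the maximal leading segment (consecutive
--     # row numbers, same phase), emit it, and recurse on the remainder.
--     if not rows_sorted:
--         return []
--     r0 = rows_sorted[0]
--     ph = records[r0]["phase"] or "?"
--     k = 1
--     while (k < len(rows_sorted)
--            and rows_sorted[k] == rows_sorted[k - 1] + 1
--            and (records[rows_sorted[k]]["phase"] or "?") == ph):
--         k += 1
--     return [(r0, rows_sorted[k - 1], ph)] + phase_segments(rows_sorted[k:], records)
-- ===== Notes on version B (the rewrite author's own statement) =====
-- stated objective: alternative
-- what changed: Replaces the stateful single-pass fold (segs/start/prev/phase accumulator with a trailing final append) by a recursive head-run extraction: peel the maximal leading run of consecutive same-phase rows, emit one segment, recurse on the rest; no mutable segment state and no post-loop append.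
import Mathlib
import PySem

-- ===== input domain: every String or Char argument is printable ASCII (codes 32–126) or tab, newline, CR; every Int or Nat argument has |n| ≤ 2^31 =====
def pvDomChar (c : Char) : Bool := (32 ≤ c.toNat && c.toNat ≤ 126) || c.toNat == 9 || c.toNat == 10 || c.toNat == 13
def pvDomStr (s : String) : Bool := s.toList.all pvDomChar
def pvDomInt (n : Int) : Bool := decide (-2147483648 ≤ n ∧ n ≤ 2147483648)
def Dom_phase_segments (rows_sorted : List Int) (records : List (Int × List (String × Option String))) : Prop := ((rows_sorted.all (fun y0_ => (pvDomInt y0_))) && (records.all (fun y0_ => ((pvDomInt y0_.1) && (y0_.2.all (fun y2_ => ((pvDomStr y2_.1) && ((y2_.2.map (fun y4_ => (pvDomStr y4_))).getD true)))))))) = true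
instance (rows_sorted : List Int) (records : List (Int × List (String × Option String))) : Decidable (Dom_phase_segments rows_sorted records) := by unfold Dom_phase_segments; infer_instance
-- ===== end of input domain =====

-- B replaces A's stateful fold by a recursive head-run extraction (alternative decomposition, same cost).

-- ===== PORT A =====
-- shared lookup helper: `records[r]["phase"] or "?"` (both Pythons use this exact idiom);
-- the default branches are unreachable under Pre_ (Python raises KeyError there).
def pvPhase (records : List (Int × List (String × Option String))) (r : Int) : String :=
  match (PySem.Dict.ofList records).get? r with
  | none => "?"
  | some rec =>
    match (PySem.Dict.ofList rec).get? "phase" with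
    | none => "?"
    | some none => "?"
    | some (some s) => if s = "" then "?" else s

-- the body of A's for loop, state = (segs, start, prev, phase)
def pvStepA (records : List (Int × List (String × Option String)))
    (st : List (Int × Int × String) × Int × Int × String) (r : Int) :
    List (Int × Int × String) × Int × Int × String :=
  let p := pvPhase records r
  if p = st.2.2.2 ∧ r = st.2.2.1 + 1 then
    (st.1, st.2.1, r, st.2.2.2)
  else
    (st.1 ++ [(st.2.1, st.2.2.1, st.2.2.2)], r, r, p)

def phase_segments (rows_sorted : List Int) (records : List (Int × List (String × Option String))) : List (Int × Int × String) :=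
  match rows_sorted with
  | [] => []
  | r0 :: rest =>
    let st := rest.foldl (pvStepA records) ([], r0, r0, pvPhase records r0)
    st.1 ++ [(st.2.1, st.2.2.1, st.2.2.2)]

-- ===== PORT B =====
-- B's inner while loop: extend the run while the next row is prev+1 with the same phase;
-- returns (last row of the run, remaining rows) = (rows[k-1], rows[k:]).
def pvRun (records : List (Int × List (String × Option String))) (ph : String) (prev : Int) (rest : List Int) : Int × List Int :=
  match rest with
  | [] => (prev, [])
  | r :: rs => if r = prev + 1 ∧ pvPhase records r = ph then pvRun records ph r rs else (prev, r :: rs)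

theorem pvRun_rem_le (records : List (Int × List (String × Option String))) (ph : String) (prev : Int) (rest : List Int) :
    (pvRun records ph prev rest).2.length ≤ rest.length := by
  induction rest generalizing prev with
  | nil => simp [pvRun]
  | cons r rs ih =>
    simp only [pvRun]
    split
    · exact le_trans (ih r) (by simp)
    · simp

def phase_segments_alt (rows_sorted : List Int) (records : List (Int × List (String × Option String))) : List (Int × Int × String) :=
  match rows_sorted with
  | [] => []
  | r0 :: rest =>
    let ph := pvPhase records r0
    let res := pvRun records ph r0 rest
    (r0, res.1, ph) :: phase_segments_alt res.2 records
termination_by rows_sorted.length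
decreasing_by
  exact Nat.lt_succ_of_le (pvRun_rem_le records (pvPhase records r0) r0 rest)

-- ===== PRECONDITION & SPEC =====
-- Pre_ excludes exactly the inputs where Python A raises KeyError: a row not a key of
-- records, or a record without a "phase" key.
def Pre_phase_segments (rows_sorted : List Int) (records : List (Int × List (String × Option String))) : Prop :=
  ∀ r ∈ rows_sorted,
    (((PySem.Dict.ofList records).get? r).bind
      (fun rec => (PySem.Dict.ofList rec).get? "phase")).isSome = true
instance (rows_sorted : List Int) (records : List (Int × List (String × Option String))) : Decidable (Pre_phase_segments rows_sorted records) := by unfold Pre_phase_segments; infer_instance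

def pvWitness_phase_segments : List Int × (List (Int × List (String × Option String))) :=
  ([0, 1, 3], [(0, [("phase", some "a")]), (1, [("phase", some "a")]), (3, [("phase", none)])])

def Spec_phase_segments (rows_sorted : List Int) (records : List (Int × List (String × Option String))) (out : List (Int × Int × String)) : Prop := out = phase_segments_alt rows_sorted records
instance (rows_sorted : List Int) (records : List (Int × List (String × Option String))) (out : List (Int × Int × String)) : Decidable (Spec_phase_segments rows_sorted records out) := by unfold Spec_phase_segments; infer_instance

-- ===== CLAIM (what is proved, stated in full; the proofs are below) =====
def Claim_equal_phase_segments : Prop := ∀ (rows_sorted : List Int) (records : List (Int × List (String × Option String))), Dom_phase_segments rows_sorted records → Pre_phase_segments rows_sorted records → Spec_phase_segments rows_sorted records (phase_segments rows_sorted records)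

-- ===== LEMMAS AND PROOFS =====

theorem alt_cons (records : List (Int × List (String × Option String))) (r0 : Int) (rest : List Int) :
    phase_segments_alt (r0 :: rest) records
      = (r0, (pvRun records (pvPhase records r0) r0 rest).1, pvPhase records r0)
          :: phase_segments_alt (pvRun records (pvPhase records r0) r0 rest).2 records := by
  rw [phase_segments_alt]

-- A's fold, started from any state, produces the already-collected segments followed by
-- exactly what B produces from the current open segment.
theorem foldA_eq (records : List (Int × List (String × Option String))) (rest : List Int) :
    ∀ (segs : List (Int × Int × String)) (start prev : Int) (ph : String),
    (rest.foldl (pvStepA records) (segs, start, prev, ph)).1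
      ++ [((rest.foldl (pvStepA records) (segs, start, prev, ph)).2.1,
           (rest.foldl (pvStepA records) (segs, start, prev, ph)).2.2.1,
           (rest.foldl (pvStepA records) (segs, start, prev, ph)).2.2.2)]
    = segs ++ (start, (pvRun records ph prev rest).1, ph)
        :: phase_segments_alt (pvRun records ph prev rest).2 records := by
  induction rest with
  | nil => intro segs start prev ph; simp [pvRun, phase_segments_alt]
  | cons r rs ih =>
    intro segs start prev ph
    by_cases h1 : pvPhase records r = ph
    · by_cases h2 : r = prev + 1
      · simp only [List.foldl_cons, pvStepA, pvRun]
        rw [if_pos ⟨h1, h2⟩, if_pos ⟨h2, h1⟩]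
        exact ih segs start r ph
      · have hA : ¬ (pvPhase records r = ph ∧ r = prev + 1) := fun h => h2 h.2
        have hB : ¬ (r = prev + 1 ∧ pvPhase records r = ph) := fun h => h2 h.1
        simp only [List.foldl_cons, pvStepA, pvRun]
        rw [if_neg hA, if_neg hB, ih (segs ++ [(start, prev, ph)]) r r (pvPhase records r),
            alt_cons]
        simp
    · have hA : ¬ (pvPhase records r = ph ∧ r = prev + 1) := fun h => h1 h.1
      have hB : ¬ (r = prev + 1 ∧ pvPhase records r = ph) := fun h => h1 h.2
      simp only [List.foldl_cons, pvStepA, pvRun]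
      rw [if_neg hA, if_neg hB, ih (segs ++ [(start, prev, ph)]) r r (pvPhase records r),
          alt_cons]
      simp

-- ===== VERDICT (by name: the statement is the Claim_ definition above) =====
theorem phase_segments_spec : Claim_equal_phase_segments := by
  intro rows_sorted records _ _
  unfold Spec_phase_segments
  cases rows_sorted with
  | nil => rw [phase_segments_alt]; rfl
  | cons r0 rest =>
    rw [alt_cons]
    have h := foldA_eq records rest [] r0 r0 (pvPhase records r0)
    simpa using h
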